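-- pv_equiv track=rewrite | github.com/HexorcistAgentM/Eleorian-TechnoMagik | digital_crossroads.py | load_strings
-- ===== SOURCE A (Python) =====
-- def load_strings(s, order):
--     table = {}
--     for i in range(len(s) - order):
--         try:
--             table[s[i:i + order]]
--         except KeyError:
--             table[s[i:i + order]] = []
--         table[s[i:i + order]] += s[i + order]
--     return table
-- ===== SOURCE B (Python) =====
-- def load_strings(s, order):
--     pairs = [(s[i:i + order], s[i + order]) for i in range(len(s) - order)]
--     keys = list(dict.fromkeys(k for k, _ in pairs))
--     return {k: [c for q, c in pairs if q == k] for k in keys}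
-- ===== Notes on version B (the rewrite author's own statement) =====
-- stated objective: alternative
-- what changed: B replaces A's position-major single-pass dict upsert (try/except, += per window) by a key-major group-by: materialize the (window, next-char) pair list once, dedupe the keys with dict.fromkeys, and build each key's value by filtering the pair list for that key.
import Mathlib
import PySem

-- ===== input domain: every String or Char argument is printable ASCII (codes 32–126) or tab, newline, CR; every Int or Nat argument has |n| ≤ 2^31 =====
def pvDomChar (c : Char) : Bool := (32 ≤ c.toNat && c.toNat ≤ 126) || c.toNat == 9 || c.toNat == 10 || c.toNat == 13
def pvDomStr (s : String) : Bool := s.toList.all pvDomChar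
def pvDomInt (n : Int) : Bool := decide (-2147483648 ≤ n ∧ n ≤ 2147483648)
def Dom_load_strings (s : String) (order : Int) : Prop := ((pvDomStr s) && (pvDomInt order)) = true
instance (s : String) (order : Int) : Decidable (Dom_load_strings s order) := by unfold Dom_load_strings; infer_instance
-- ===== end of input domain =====

-- B builds the table key-major: materialize the (window, next-char) pair list, dedupe the keys,
-- then collect each key's followers by filtering the pair list — instead of A's per-position
-- try/except dict upsert; equal return values on Pre_ (no observable mutation in either).


-- ===== PORT A =====
def load_strings (s : String) (order : Int) : List (String × List String) :=
  let cs := s.toList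
  ((PySem.List.pyRange 0 (PySem.Str.len s - order) 1).foldl
    (fun (table : PySem.Dict String (List String)) i =>
      let key : String := String.mk (PySem.List.slice cs (some i) (some (i + order)))
      -- try: table[key]  except KeyError: table[key] = []
      let t1 := match table.get? key with
        | some _ => table
        | none   => table.insert key []
      -- table[key] += s[i + order]  (appends the one character; IndexError excluded by Pre_)
      match PySem.List.pyGet? cs (i + order) with
      | some c => t1.modify key [] (fun v => v ++ [String.mk [c]])
      | none   => t1)
    PySem.Dict.empty).items

-- ===== PORT B =====
def load_strings_alt (s : String) (order : Int) : List (String × List String) :=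
  let cs := s.toList
  -- pairs = [(s[i:i+order], s[i+order]) for i in range(len(s) - order)]
  let pairs : List (String × String) :=
    (PySem.List.pyRange 0 (PySem.Str.len s - order) 1).map
      (fun i => (String.mk (PySem.List.slice cs (some i) (some (i + order))),
                 match PySem.List.pyGet? cs (i + order) with   -- IndexError excluded by Pre_
                 | some c => String.mk [c]
                 | none   => ""))
  -- keys = list(dict.fromkeys(k for k, _ in pairs))
  let keys : List String := PySem.List.dedup (pairs.map Prod.fst)
  -- {k: [c for q, c in pairs if q == k] for k in keys}
  (keys.foldl
    (fun (d : PySem.Dict String (List String)) k =>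
      d.insert k ((pairs.filter (fun p => p.1 == k)).map Prod.snd))
    PySem.Dict.empty).items

-- ===== PRECONDITION & SPEC =====
-- A raises IndexError (s[i + order] with i = 0) exactly when order < -len(s); B raises there too.
def Pre_load_strings (s : String) (order : Int) : Prop := -(PySem.Str.len s) ≤ order
instance (s : String) (order : Int) : Decidable (Pre_load_strings s order) := by unfold Pre_load_strings; infer_instance
def pvWitness_load_strings : String × Int := ("abab", 1)

def Spec_load_strings (s : String) (order : Int) (out : List (String × List String)) : Prop := out = load_strings_alt s order
instance (s : String) (order : Int) (out : List (String × List String)) : Decidable (Spec_load_strings s order out) := by unfold Spec_load_strings; infer_instance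

-- ===== CLAIM (what is proved, stated in full; the proofs are below) =====
def Claim_equal_load_strings : Prop := ∀ (s : String) (order : Int), Dom_load_strings s order → Pre_load_strings s order → Spec_load_strings s order (load_strings s order)

-- ===== LEMMAS AND PROOFS =====

-- the window substring at offset j and the character that follows it (as a 1-char string)
def pvKey (cs : List Char) (order : Int) (j : Nat) : String :=
  String.mk (PySem.List.slice cs (some (j : Int)) (some ((j : Int) + order)))
def pvChr (cs : List Char) (order : Int) (j : Nat) : String :=
  match PySem.List.pyGet? cs ((j : Int) + order) with
  | some c => String.mk [c]
  | none   => ""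
-- the (key, following char) pair list both programs traverse
def pvPairs (cs : List Char) (order : Int) (m : Nat) : List (String × String) :=
  (List.range m).map (fun j => (pvKey cs order j, pvChr cs order j))

lemma pyRange01 (n : Int) :
    PySem.List.pyRange 0 n 1 = List.map (fun k : Nat => (k : Int)) (List.range n.toNat) := by
  by_cases h : 0 ≤ n
  · obtain ⟨m, rfl⟩ := Int.eq_ofNat_of_zero_le h
    simpa using PySem.List.pyRange_zero_natCast m
  · have h0 : n.toNat = 0 := Int.toNat_of_nonpos (by omega)
    rw [h0]
    simp [PySem.List.pyRange]
    omega

lemma hsome (s : String) (order : Int) (hpre : Pre_load_strings s order) :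
    ∀ j : Nat, j < (PySem.Str.len s - order).toNat →
      ∃ c, PySem.List.pyGet? s.toList ((j : Int) + order) = some c := by
  intro j hj
  unfold Pre_load_strings PySem.Str.len at *
  set cs := s.toList with hcs
  set L := cs.length with hL
  have hi1 : -(L : Int) ≤ (j : Int) + order := by omega
  have hi2 : (j : Int) + order < L := by omega
  unfold PySem.List.pyGet? PySem.List.pyIdx?
  by_cases h0 : 0 ≤ (j : Int) + order
  · have hk : ((j : Int) + order).toNat < L := by omega
    refine ⟨cs[((j : Int) + order).toNat]'hk, ?_⟩
    rw [if_pos h0, if_pos (show (j : Int) + order < (cs.length : Int) by omega)]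
    simp only [Option.bind_some]
    exact List.getElem?_eq_getElem hk
  · have hk : L - (-((j : Int) + order)).toNat < L := by omega
    refine ⟨cs[L - (-((j : Int) + order)).toNat]'hk, ?_⟩
    rw [if_neg h0, if_pos (show -(cs.length : Int) ≤ (j : Int) + order from hi1)]
    simp only [Option.bind_some]
    exact List.getElem?_eq_getElem hk

-- A's ensure-then-append step is exactly dict.modify with default []
lemma stepA_eq (d : PySem.Dict String (List String)) (k : String) (c : String) :
    (match d.get? k with
      | some _ => d
      | none   => d.insert k []).modify k [] (fun v => v ++ [c])
    = d.modify k [] (fun v => v ++ [c]) := by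
  cases h : d.get? k with
  | some v => simp
  | none =>
    simp only [PySem.Dict.modify]
    rw [PySem.Dict.getD_insert_self, PySem.Dict.insert_insert_self,
        PySem.Dict.getD_of_get?_eq_none _ _ h]

-- A's whole loop is the modify-fold over pvPairs
lemma portA_eq_fold (s : String) (order : Int) (hpre : Pre_load_strings s order) :
    load_strings s order =
      ((pvPairs s.toList order (PySem.Str.len s - order).toNat).foldl
        (fun d p => d.modify p.1 [] (fun v => v ++ [p.2])) PySem.Dict.empty).items := by
  unfold load_strings pvPairs
  dsimp only
  rw [pyRange01]
  rw [List.foldl_map (f := fun k : Nat => (k : Int))]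
  rw [List.foldl_map (f := fun j => (pvKey s.toList order j, pvChr s.toList order j))]
  congr 1
  apply PySem.List.foldl_congr_mem
  intro acc j hj
  have hj' : j < (PySem.Str.len s - order).toNat := List.mem_range.mp hj
  obtain ⟨c, hc⟩ := hsome s order hpre j hj'
  simp only [pvKey, pvChr, hc]
  exact stepA_eq acc _ _

-- a fold of insertions never touches a key not in the list
lemma getD_foldl_insert_not_mem (f : String → List String) (k : String) :
    ∀ (l : List String) (d : PySem.Dict String (List String)), k ∉ l →
      (l.foldl (fun d k' => d.insert k' (f k')) d).getD k [] = d.getD k [] := by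
  intro l
  induction l with
  | nil => intro d _; rfl
  | cons a t ih =>
    intro d hk
    simp only [List.foldl_cons]
    have hka : k ≠ a := fun h => hk (by rw [h]; exact List.mem_cons_self ..)
    rw [ih _ (fun h => hk (List.mem_cons_of_mem _ h)),
        PySem.Dict.getD_insert_of_ne _ _ _ hka]

-- on nodup keys the insert-fold stores exactly f k at k
lemma getD_foldl_insert_mem (f : String → List String) (k : String) :
    ∀ (l : List String) (d : PySem.Dict String (List String)), l.Nodup → k ∈ l →
      (l.foldl (fun d k' => d.insert k' (f k')) d).getD k [] = f k := by
  intro l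
  induction l with
  | nil => intro d _ hk; cases hk
  | cons a t ih =>
    intro d hnd hk
    simp only [List.foldl_cons]
    rcases List.mem_cons.mp hk with rfl | hkt
    · rw [getD_foldl_insert_not_mem f k t _ (List.nodup_cons.mp hnd).1,
          PySem.Dict.getD_insert_self]
    · exact ih _ (List.nodup_cons.mp hnd).2 hkt

-- Set.ofList of a duplicate-free list is the list itself
lemma set_update_nodup : ∀ (l : List String) (acc : PySem.Set String),
    l.Nodup → (∀ x ∈ l, acc.contains x = false) → PySem.Set.update acc l = acc ++ l := by
  intro l
  induction l with
  | nil => intro acc _ _; simp [PySem.Set.update]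
  | cons a t ih =>
    intro acc hnd hacc
    show PySem.Set.update (PySem.Set.add acc a) t = acc ++ a :: t
    have ha : PySem.Set.add acc a = acc ++ [a] := by
      unfold PySem.Set.add
      rw [hacc a (by simp)]
      rfl
    rw [ha, ih _ (List.nodup_cons.mp hnd).2 ?_, List.append_assoc]
    · rfl
    · intro x hx
      have hxa : x ≠ a := fun h => (List.nodup_cons.mp hnd).1 (h ▸ hx)
      have hxacc : x ∉ acc := by
        simpa [PySem.Set.contains] using hacc x (List.mem_cons_of_mem _ hx)
      simp [PySem.Set.contains, hxacc, hxa]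

lemma ofList_of_nodup (l : List String) (h : l.Nodup) : PySem.Set.ofList l = l := by
  have := set_update_nodup l PySem.Set.empty h (fun x _ => rfl)
  simpa [PySem.Set.ofList_eq_foldl, PySem.Set.update] using this

-- B's insert-fold lists exactly (k, f k) over its nodup key list
lemma items_foldl_insert (keys : List String) (f : String → List String) (h : keys.Nodup) :
    ((keys.foldl (fun (d : PySem.Dict String (List String)) k => d.insert k (f k))
        PySem.Dict.empty).items)
      = keys.map (fun k => (k, f k)) := by
  have hK : (keys.foldl (fun (d : PySem.Dict String (List String)) k => d.insert k (f k))
      PySem.Dict.empty).keys = keys := by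
    rw [PySem.Dict.keys_foldl_insert keys (fun _ k => f k) PySem.Dict.empty]
    exact ofList_of_nodup keys h
  have hnd : (keys.foldl (fun (d : PySem.Dict String (List String)) k => d.insert k (f k))
      PySem.Dict.empty).keys.Nodup := by rw [hK]; exact h
  rw [PySem.Dict.items_eq_map_keys _ hnd [], hK]
  exact List.map_congr_left (fun k hk => by rw [getD_foldl_insert_mem f k keys _ h hk])

-- ===== VERDICT (by name: the statement is the Claim_ definition above) =====
theorem load_strings_spec : Claim_equal_load_strings := by
  intro s order _hdom hpre
  unfold Spec_load_strings
  rw [portA_eq_fold s order hpre]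
  unfold load_strings_alt
  dsimp only
  rw [pyRange01, List.map_map]
  have hmap : List.map ((fun i => (String.mk (PySem.List.slice s.toList (some i) (some (i + order))),
        match PySem.List.pyGet? s.toList (i + order) with
        | some c => String.mk [c]
        | none   => "")) ∘ (fun k : Nat => (k : Int)))
      (List.range (PySem.Str.len s - order).toNat)
      = pvPairs s.toList order (PySem.Str.len s - order).toNat := by
    unfold pvPairs
    exact List.map_congr_left (fun j _ => rfl)
  rw [hmap]
  set ps := pvPairs s.toList order (PySem.Str.len s - order).toNat with hps
  set f : String → List String := fun k => (ps.filter (fun p => p.1 == k)).map Prod.snd with hf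
  -- B's side: insert-fold over the deduped keys
  have hdd : PySem.List.dedup (ps.map Prod.fst) = PySem.Set.ofList (ps.map Prod.fst) := by
    simp
  rw [hdd, items_foldl_insert _ f (PySem.Set.nodup_ofList _)]
  -- A's side: keys / nodup / values of the modify-fold
  set dA : PySem.Dict String (List String) :=
    ps.foldl (fun d p => d.modify p.1 [] (fun v => v ++ [p.2])) PySem.Dict.empty with hdA
  have hkA : dA.keys = PySem.Set.ofList (ps.map Prod.fst) := by
    rw [hdA, PySem.Dict.keys_foldl_modify_key ps Prod.fst ([] : List String)
      (fun d p => fun v => v ++ [p.2]) PySem.Dict.empty]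
    rfl
  have hndA : dA.keys.Nodup := by
    rw [hdA]
    exact PySem.Dict.nodup_keys_foldl_modify_key ps Prod.fst ([] : List String)
      (fun d p => fun v => v ++ [p.2]) PySem.Dict.empty List.nodup_nil
  have hvA : ∀ k, dA.getD k [] = f k := by
    intro k
    rw [hdA, PySem.Dict.getD_foldl_modify_append ps PySem.Dict.empty k]
    rfl
  rw [PySem.Dict.items_eq_map_keys dA hndA [], hkA]
  exact List.map_congr_left (fun k _ => by rw [hvA k])
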